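-- pv_equiv track=rewrite | github.com/Seth-R/py | CodeWars2.py | squared_digits_series
-- ===== SOURCE A (Python) =====
-- def squared_digits_series(n):
--     sec=[]
--     a = n
--     u=1
--     c=0
--     i=n-1
--     suma = 0
--     while a != 0:
--         c+=1
--         residuo = 1%2
--
--         if c>1:
--             residuo = c%u
--         if residuo!=0:#si entra es por que no es potencia de dos
--             n = (u)*10 + 1
--             sec.append(n)
--         else:
--             u=c
--
--             n = u*10+1
--             sec.append(n)
--         a-=1
--
--         suma = sum(sec)
--     return(suma)
-- ===== SOURCE B (Python) =====
-- def squared_digits_series(n):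
--     # The sequence's c-th term is 10 * 2**floor(log2(c)) + 1, so the total is a
--     # closed form over the powers of two up to n: O(log n) instead of A's O(n^2).
--     if n <= 0:
--         return 0
--     p = 1          # largest power of two <= n, built by doubling
--     q = 0          # sum of p'*p' over the previous powers p' < p
--     while 2 * p <= n:
--         q += p * p
--         p *= 2
--     return n + 10 * (q + (n - p + 1) * p)
-- ===== Notes on version B (the rewrite author's own statement) =====
-- stated objective: faster
-- what changed: Replaces the per-iteration list append plus full re-summation with a closed-form sum over the powers of two up to n (the appended term is constant between consecutive powers of two), computed by a doubling loop.
-- outside the precondition, e.g. on squared_digits_series(-1): A does not finish within the time limit, B returns 0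
import Mathlib
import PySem

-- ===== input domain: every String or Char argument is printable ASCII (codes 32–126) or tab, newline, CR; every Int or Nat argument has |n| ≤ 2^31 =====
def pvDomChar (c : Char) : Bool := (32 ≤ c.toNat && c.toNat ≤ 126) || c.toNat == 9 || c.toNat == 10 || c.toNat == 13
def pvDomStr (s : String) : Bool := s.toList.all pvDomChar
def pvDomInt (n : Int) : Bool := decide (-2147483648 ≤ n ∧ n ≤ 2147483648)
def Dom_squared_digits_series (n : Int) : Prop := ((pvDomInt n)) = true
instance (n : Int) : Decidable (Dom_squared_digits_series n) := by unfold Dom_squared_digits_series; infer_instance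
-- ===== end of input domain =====

-- B replaces A's quadratic append-and-resum loop by a closed-form sum over the
-- powers of two up to n (asymptotically faster; a timing run measures it).

-- ===== PORT A =====
-- the while loop of A: fuel a = the countdown variable `a`; state (sec, u, c, suma)
def pvALoop : Nat → List Int → Int → Int → Int → Int
  | 0, _sec, _u, _c, suma => suma
  | a + 1, sec, u, c, _suma =>
      let c' := c + 1
      let residuo : Int := if c' > 1 then PySem.Int.mod c' u else 1 % 2
      if residuo ≠ 0 then
        let sec' := sec ++ [u * 10 + 1]
        pvALoop a sec' u c' sec'.sum
      else
        let u' := c'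
        let sec' := sec ++ [u' * 10 + 1]
        pvALoop a sec' u' c' sec'.sum

def squared_digits_series (n : Int) : Int := pvALoop n.toNat [] 1 0 0

-- ===== PORT B =====
-- the while loop of Source B: runs while 2*p ≤ n; fuel n.toNat is enough since p doubles
def pvBLoop (n : Int) : Nat → Int → Int → Int × Int
  | 0, p, q => (p, q)
  | f + 1, p, q => if 2 * p ≤ n then pvBLoop n f (p * 2) (q + p * p) else (p, q)

def squared_digits_series_alt (n : Int) : Int :=
  if n ≤ 0 then 0
  else
    let pq := pvBLoop n n.toNat 1 0
    n + 10 * (pq.2 + (n - pq.1 + 1) * pq.1)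

-- ===== PRECONDITION & SPEC =====
-- A's while loop never terminates for n < 0 (`a` decrements past 0), so Pre_ excludes n < 0.
def Pre_squared_digits_series (n : Int) : Prop := 0 ≤ n
instance (n : Int) : Decidable (Pre_squared_digits_series n) := by unfold Pre_squared_digits_series; infer_instance
def pvWitness_squared_digits_series : Int := (5)

def Spec_squared_digits_series (n : Int) (out : Int) : Prop := out = squared_digits_series_alt n
instance (n : Int) (out : Int) : Decidable (Spec_squared_digits_series n out) := by unfold Spec_squared_digits_series; infer_instance

-- ===== CLAIM (what is proved, stated in full; the proofs are below) =====
def Claim_equal_squared_digits_series : Prop := ∀ (n : Int), Dom_squared_digits_series n → Pre_squared_digits_series n → Spec_squared_digits_series n (squared_digits_series n)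

-- ===== LEMMAS AND PROOFS =====

-- S m = the sum A builds after m loop iterations: the c-th appended term is 10·2^⌊log2 c⌋ + 1
def pvS : Nat → Int
  | 0 => 0
  | m + 1 => pvS m + (10 * (2 : Int) ^ (Nat.log 2 (m + 1)) + 1)

-- Q k = Σ_{j<k} 4^j, the partial sum B's loop accumulates in q
def pvQ : Nat → Int
  | 0 => 0
  | k + 1 => pvQ k + (2 : Int) ^ k * (2 : Int) ^ k

lemma pv_log_bounds (m : Nat) (h : 1 ≤ m) :
    2 ^ Nat.log 2 m ≤ m ∧ m < 2 ^ (Nat.log 2 m + 1) :=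
  ⟨Nat.pow_log_le_self 2 (by omega), Nat.lt_pow_succ_log_self (by norm_num) m⟩

lemma pv_mod_iff (m : Nat) (h : 1 ≤ m) :
    (m + 1) % 2 ^ Nat.log 2 m = 0 ↔ m + 1 = 2 ^ (Nat.log 2 m + 1) := by
  obtain ⟨h1, h2⟩ := pv_log_bounds m h
  constructor
  · intro hm
    obtain ⟨t, ht⟩ := Nat.dvd_of_mod_eq_zero hm
    have hP : 1 ≤ 2 ^ Nat.log 2 m := Nat.one_le_two_pow
    rw [pow_succ] at h2
    have hlt : 2 ^ Nat.log 2 m < 2 ^ Nat.log 2 m * t := by omega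
    have hle : 2 ^ Nat.log 2 m * t ≤ 2 ^ Nat.log 2 m * 2 := by nlinarith
    have h3 : 2 ≤ t := by nlinarith
    have h4 : t ≤ 2 := Nat.le_of_mul_le_mul_left hle (by omega)
    have ht2 : t = 2 := by omega
    subst ht2
    rw [pow_succ]
    omega
  · intro hm; simp [hm, pow_succ, Nat.mul_mod_right]

lemma pv_log_succ_pow (m : Nat) (hp : m + 1 = 2 ^ (Nat.log 2 m + 1)) :
    Nat.log 2 (m + 1) = Nat.log 2 m + 1 := by
  rw [hp, Nat.log_pow (by norm_num)]

lemma pv_log_succ_not (m : Nat) (h : 1 ≤ m) (hp : m + 1 ≠ 2 ^ (Nat.log 2 m + 1)) :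
    Nat.log 2 (m + 1) = Nat.log 2 m := by
  obtain ⟨h1, h2⟩ := pv_log_bounds m h
  exact Nat.log_eq_of_pow_le_of_lt_pow (by omega) (by omega)

-- A-side invariant: with counter c = m ≥ 1 and u = 2^⌊log2 m⌋, the loop adds S(m+a) - S(m)
lemma pvALoop_inv (a : Nat) : ∀ (sec : List Int) (m : Nat), 1 ≤ m →
    pvALoop a sec (((2 ^ Nat.log 2 m : Nat) : Int)) (m : Int) sec.sum
      = sec.sum + (pvS (m + a) - pvS m) := by
  induction a with
  | zero => intro sec m _; simp [pvALoop]
  | succ a ih =>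
      intro sec m hm
      have hc : ((m : Int) + 1 > 1) = True := by simp; omega
      have hcast : (m : Int) + 1 = ((m + 1 : Nat) : Int) := by push_cast; ring
      by_cases hpow : m + 1 = 2 ^ (Nat.log 2 m + 1)
      · -- residuo = 0 : else branch, u becomes c' = m+1 = 2^(log2 m + 1)
        have hres : PySem.Int.mod ((m : Int) + 1) ((2 ^ Nat.log 2 m : Nat) : Int) = 0 := by
          rw [hcast]
          rw [show ((2 ^ Nat.log 2 m : Nat) : Int) = (((2 ^ Nat.log 2 m : Nat) : Nat) : Int) from rfl]
          rw [PySem.Int.mod_natCast]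
          simp [(pv_mod_iff m hm).2 hpow]
        simp only [pvALoop, hc, if_true, hres]
        rw [if_neg (by simp)]
        rw [hcast]
        have hlog : Nat.log 2 (m + 1) = Nat.log 2 m + 1 := pv_log_succ_pow m hpow
        have hcoe : ((2 ^ Nat.log 2 (m + 1) : Nat) : Int) = ((m + 1 : Nat) : Int) := by
          rw [hlog, ← hpow]
        have hstep := ih (sec ++ [((m + 1 : Nat) : Int) * 10 + 1]) (m + 1) (by omega)
        rw [hcoe] at hstep
        rw [hstep]
        have hterm : ((m + 1 : Nat) : Int) = (2 : Int) ^ Nat.log 2 (m + 1) := by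
          rw [← hcoe]; push_cast; ring
        rw [show m + (a + 1) = (m + 1) + a from by omega]
        simp only [List.sum_append, List.sum_cons, List.sum_nil, pvS]
        rw [hterm]
        ring
      · -- residuo ≠ 0 : if branch, u unchanged and log2 is unchanged
        have hmod : (m + 1) % 2 ^ Nat.log 2 m ≠ 0 := fun hh => hpow ((pv_mod_iff m hm).1 hh)
        have hres : PySem.Int.mod ((m : Int) + 1) ((2 ^ Nat.log 2 m : Nat) : Int)
            = (((m + 1) % 2 ^ Nat.log 2 m : Nat) : Int) := by
          rw [hcast]; exact_mod_cast PySem.Int.mod_natCast (m + 1) (2 ^ Nat.log 2 m)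
        simp only [pvALoop, hc, if_true, hres]
        rw [if_pos (by exact_mod_cast hmod)]
        rw [hcast]
        have hlog : Nat.log 2 (m + 1) = Nat.log 2 m := pv_log_succ_not m hm hpow
        have hstep := ih (sec ++ [((2 ^ Nat.log 2 m : Nat) : Int) * 10 + 1]) (m + 1) (by omega)
        rw [hlog] at hstep
        rw [hstep]
        rw [show m + (a + 1) = (m + 1) + a from by omega]
        simp only [List.sum_append, List.sum_cons, List.sum_nil, pvS]
        rw [hlog]
        push_cast
        ring

-- A equals the running sum pvS of its appended terms
lemma pvA_eq_S (n : Int) (_hn : 0 ≤ n) : squared_digits_series n = pvS n.toNat := by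
  unfold squared_digits_series
  cases h : n.toNat with
  | zero => simp [pvALoop, pvS]
  | succ a =>
      have h1 : pvALoop (a + 1) [] 1 0 0 = pvALoop a [11] 1 1 11 := by
        norm_num [pvALoop]
      rw [h1]
      have h2 := pvALoop_inv a [11] 1 (le_refl 1)
      rw [Nat.log_one_right] at h2
      rw [show 1 + a = a + 1 from by omega] at h2
      norm_num at h2
      rw [h2]
      have hS1 : pvS 1 = 11 := by norm_num [pvS, Nat.log_one_right]
      rw [hS1]
      omega

-- B's doubling loop lands on the largest power of two ≤ n and the matching pvQ
lemma pvBLoop_spec (n : Int) (hn : 1 ≤ n) :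
    ∀ (fuel j : Nat), Nat.log 2 n.toNat ≤ j + fuel → 2 ^ j ≤ n.toNat →
    pvBLoop n fuel ((2 ^ j : Nat) : Int) (pvQ j)
      = (((2 ^ Nat.log 2 n.toNat : Nat) : Int), pvQ (Nat.log 2 n.toNat)) := by
  intro fuel
  induction fuel with
  | zero =>
      intro j hle hpow
      have hj : j = Nat.log 2 n.toNat := by
        have := (Nat.le_log_iff_pow_le (by norm_num) (by omega)).2 hpow
        omega
      simp [pvBLoop, hj]
  | succ f ih =>
      intro j hle hpow
      by_cases hc : 2 ^ (j + 1) ≤ n.toNat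
      · have hcond : 2 * ((2 ^ j : Nat) : Int) ≤ n := by
          have h' : ((2 ^ (j + 1) : Nat) : Int) ≤ n := by
            rw [← Int.toNat_of_nonneg (by omega : (0 : Int) ≤ n)]
            exact_mod_cast hc
          push_cast at h' ⊢
          rw [pow_succ] at h'
          linarith
        simp only [pvBLoop, if_pos hcond]
        have hp : ((2 ^ j : Nat) : Int) * 2 = ((2 ^ (j + 1) : Nat) : Int) := by
          push_cast; ring
        have hq : pvQ j + ((2 ^ j : Nat) : Int) * ((2 ^ j : Nat) : Int) = pvQ (j + 1) := by
          simp only [pvQ]; push_cast; ring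
        rw [hp, hq]
        exact ih (j + 1) (by omega) hc
      · have hj : j = Nat.log 2 n.toNat := by
          have h1 := (Nat.le_log_iff_pow_le (by norm_num) (by omega : n.toNat ≠ 0)).2 hpow
          have h2 : Nat.log 2 n.toNat < j + 1 := Nat.log_lt_of_lt_pow (by omega) (by omega)
          omega
        have hcond : ¬ (2 * ((2 ^ j : Nat) : Int) ≤ n) := by
          intro hcc
          apply hc
          rw [← Int.toNat_of_nonneg (by omega : (0 : Int) ≤ n)] at hcc
          have : ((2 ^ (j + 1) : Nat) : Int) ≤ ((n.toNat : Nat) : Int) := by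
            push_cast at hcc ⊢
            rw [pow_succ]
            linarith
          exact_mod_cast this
        simp only [pvBLoop]
        rw [if_neg hcond, hj]

-- B in closed form at the top level
lemma pvB_closed (n : Int) (hn : 1 ≤ n) :
    squared_digits_series_alt n
      = n + 10 * (pvQ (Nat.log 2 n.toNat)
          + (n - ((2 ^ Nat.log 2 n.toNat : Nat) : Int) + 1) * ((2 ^ Nat.log 2 n.toNat : Nat) : Int)) := by
  unfold squared_digits_series_alt
  rw [if_neg (by omega)]
  have hb := pvBLoop_spec n hn n.toNat 0
    (by have := Nat.log_le_self 2 n.toNat; omega)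
    (by simpa using (by omega : 1 ≤ n.toNat))
  norm_num [pvQ] at hb
  show n + 10 * ((pvBLoop n n.toNat 1 0).2 + (n - (pvBLoop n n.toNat 1 0).1 + 1) * (pvBLoop n n.toNat 1 0).1) = _
  rw [hb]
  push_cast
  ring

-- the running sum pvS in closed form (the heart of the equivalence)
lemma pvS_closed : ∀ (m : Nat), 1 ≤ m →
    pvS m = (m : Int) + 10 * (pvQ (Nat.log 2 m)
        + ((m : Int) - (2 : Int) ^ Nat.log 2 m + 1) * (2 : Int) ^ Nat.log 2 m) := by
  intro m
  induction m with
  | zero => intro h; omega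
  | succ m ih =>
      intro _
      by_cases hm : 1 ≤ m
      · have hS := ih hm
        by_cases hpow : m + 1 = 2 ^ (Nat.log 2 m + 1)
        · have hlog : Nat.log 2 (m + 1) = Nat.log 2 m + 1 := pv_log_succ_pow m hpow
          have hmInt : (m : Int) = 2 * (2 : Int) ^ Nat.log 2 m - 1 := by
            have h' : ((m + 1 : Nat) : Int) = ((2 ^ (Nat.log 2 m + 1) : Nat) : Int) := by
              exact_mod_cast congrArg (fun x : Nat => (x : Int)) hpow
            push_cast at h'
            rw [pow_succ] at h'
            linarith
          rw [show pvS (m + 1) = pvS m + (10 * (2 : Int) ^ Nat.log 2 (m + 1) + 1) from rfl]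
          rw [hS, hlog]
          simp only [pvQ]
          push_cast
          rw [hmInt, pow_succ]
          ring
        · have hlog : Nat.log 2 (m + 1) = Nat.log 2 m := pv_log_succ_not m hm hpow
          rw [show pvS (m + 1) = pvS m + (10 * (2 : Int) ^ Nat.log 2 (m + 1) + 1) from rfl]
          rw [hS, hlog]
          push_cast
          ring
      · have hm0 : m = 0 := by omega
        subst hm0
        norm_num [pvS, pvQ, Nat.log_one_right]

-- ===== VERDICT (by name: the statement is the Claim_ definition above) =====
theorem squared_digits_series_spec : Claim_equal_squared_digits_series := by
  intro n _ hpre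
  have hp : (0 : Int) ≤ n := hpre
  unfold Spec_squared_digits_series
  by_cases hn : 1 ≤ n
  · rw [pvA_eq_S n hp, pvB_closed n hn, pvS_closed n.toNat (by omega)]
    rw [Int.toNat_of_nonneg hpre]
    push_cast
    ring
  · have hn0 : n = 0 := by omega
    subst hn0
    simp [squared_digits_series, squared_digits_series_alt, pvALoop]
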